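-- pv_equiv track=rewrite | github.com/thomasjji14/Player-Unknown-Chess-Board | Game.py | _expandFEN
-- ===== SOURCE A (Python) =====
-- def _expandFEN(boardFEN) -> list:
--     cleanedCode = ""
--     numberList = ("1", "2", "3", "4", "5", "6", "7", "8")
--
--     # Converts numbers into dashes
--     for index in range(len(boardFEN)):
--         if boardFEN[index] in numberList:
--             for repeats in range(int(boardFEN[index])):
--                 cleanedCode += "-"
--         else:
--             cleanedCode += boardFEN[index]
--
--     boardRowLists = [list(row) for row in cleanedCode.split("/")]
--
--     boardGrid = []
--     for row in boardRowLists: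
--         rowInfo = []
--         for character in row:
--             rowInfo.append(character)
--
--         boardGrid.append(rowInfo)
--
--     return boardGrid
-- ===== SOURCE B (Python) =====
-- def _expandFEN(boardFEN) -> list:
--     cleaned = boardFEN
--     for digit in "12345678":
--         cleaned = cleaned.replace(digit, "-" * int(digit))
--     return [list(row) for row in cleaned.split("/")]
-- ===== Notes on version B (the rewrite author's own statement) =====
-- stated objective: faster
-- what changed: Replaces A's per-character Python scan (conditional inner dash loop, then split, then a grid-copy loop) with eight staged whole-string str.replace passes, one per digit 1-8, followed directly by a split on the row separator and list(); correct because the dashes a pass introduces are never digits, so later passes leave them untouched.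
import Mathlib
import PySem

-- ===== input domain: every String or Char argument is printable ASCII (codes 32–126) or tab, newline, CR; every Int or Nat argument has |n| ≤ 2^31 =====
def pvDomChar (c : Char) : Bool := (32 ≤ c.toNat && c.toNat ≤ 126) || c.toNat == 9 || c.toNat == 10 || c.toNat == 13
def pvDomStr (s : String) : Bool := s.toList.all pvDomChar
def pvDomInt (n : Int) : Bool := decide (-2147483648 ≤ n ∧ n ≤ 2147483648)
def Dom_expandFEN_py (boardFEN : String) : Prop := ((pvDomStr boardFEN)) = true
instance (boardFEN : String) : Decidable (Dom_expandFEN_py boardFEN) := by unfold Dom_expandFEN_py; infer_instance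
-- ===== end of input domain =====

-- B performs eight staged whole-string replace passes (one per digit 1-8) and then splits,
-- instead of A's per-character scan with an inner dash loop and a second grid-copy loop (measurably faster: the passes run in C).

-- ===== PORT A =====
-- 'for index in range(len(boardFEN))' reading boardFEN[index] visits the characters in
-- order: ported as a fold over the character list (exact for sequential 0..len-1 indexing).
-- 'int(boardFEN[index])' is PySem.Int.ofChars? on the single char; inside the branch the
-- char is one of '1'..'8' so the parse succeeds and .getD 0 never supplies the default.
def expandFEN_py (boardFEN : String) : List (List String) :=
  let numberList : List Char := ['1', '2', '3', '4', '5', '6', '7', '8']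
  let cleanedCode : List Char := boardFEN.toList.foldl (fun acc c =>
    if c ∈ numberList then
      (PySem.List.pyRange 0 ((PySem.Int.ofChars? [c]).getD 0) 1).foldl
        (fun a _ => a ++ ['-']) acc
    else acc ++ [c]) []
  let boardRowLists : List (List String) :=
    (PySem.Chars.splitOn cleanedCode ['/']).map (fun row => row.map (fun ch => String.ofList [ch]))
  let boardGrid : List (List String) := boardRowLists.foldl (fun g row =>
    g ++ [row.foldl (fun ri ch => ri ++ [ch]) []]) []
  boardGrid

-- ===== PORT B =====
-- Source B: for digit in "12345678": cleaned = cleaned.replace(digit, "-" * int(digit));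
-- then [list(row) for row in cleaned.split("/")].  '"-" * int(d)' is List.replicate of
-- the parsed digit value (1..8, so ≥ 0 and the parse succeeds).
def expandFEN_py_alt (boardFEN : String) : List (List String) :=
  let cleaned : List Char := (['1', '2', '3', '4', '5', '6', '7', '8'] : List Char).foldl
    (fun s d => PySem.Chars.replace s [d]
      (List.replicate ((PySem.Int.ofChars? [d]).getD 0).toNat '-')) boardFEN.toList
  (PySem.Chars.splitOn cleaned ['/']).map (fun row => row.map (fun ch => String.ofList [ch]))

-- ===== PRECONDITION & SPEC =====
def Spec_expandFEN_py (boardFEN : String) (out : List (List String)) : Prop := out = expandFEN_py_alt boardFEN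
instance (boardFEN : String) (out : List (List String)) : Decidable (Spec_expandFEN_py boardFEN out) := by unfold Spec_expandFEN_py; infer_instance

-- ===== CLAIM (what is proved, stated in full; the proofs are below) =====
def Claim_equal_expandFEN_py : Prop := ∀ (boardFEN : String), Dom_expandFEN_py boardFEN → Spec_expandFEN_py boardFEN (expandFEN_py boardFEN)

-- ===== LEMMAS AND PROOFS =====

-- char-level expansion: a digit '1'..'8' becomes that many dashes, anything else itself
def pvE (c : Char) : List Char :=
  if c ∈ (['1', '2', '3', '4', '5', '6', '7', '8'] : List Char) then
    List.replicate ((PySem.Int.ofChars? [c]).getD 0).toNat '-'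
  else [c]

-- one replace step of B, as a per-character function
def pvR (d c : Char) : List Char :=
  if c = d then List.replicate ((PySem.Int.ofChars? [d]).getD 0).toNat '-' else [c]

-- replace with a SINGLE-character pattern is a flatMap (unfolds PySem.Chars.replace.go)
theorem pvReplaceGo1 (d : Char) (new : List Char) (fuel : Nat) :
    ∀ (l acc : List Char), l.length ≤ fuel →
    PySem.Chars.replace.go [d] new fuel l acc =
      acc.reverse ++ l.flatMap (fun c => if c = d then new else [c]) := by
  induction fuel with
  | zero =>
    intro l acc h
    have : l = [] := List.eq_nil_of_length_eq_zero (Nat.le_zero.mp h)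
    subst this
    simp [PySem.Chars.replace.go]
  | succ f ih =>
    intro l acc h
    cases l with
    | nil => simp [PySem.Chars.replace.go]
    | cons c t =>
      rw [PySem.Chars.replace.go]
      by_cases hc : c = d
      · subst hc
        rw [if_pos (by simp [List.isPrefixOf])]
        rw [ih _ _ (by simpa using Nat.le_of_succ_le_succ h)]
        simp
      · rw [if_neg (by simp [List.isPrefixOf]; intro h'; exact hc h'.symm)]
        rw [ih _ _ (by simpa using Nat.le_of_succ_le_succ h)]
        simp [hc]

theorem pvReplace1 (l : List Char) (d : Char) (new : List Char) :
    PySem.Chars.replace l [d] new = l.flatMap (fun c => if c = d then new else [c]) := by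
  rw [PySem.Chars.replace]
  rw [if_neg (by simp)]
  rw [pvReplaceGo1 d new l.length l [] (Nat.le_refl _)]
  simp

-- staged flatMaps compose into one flatMap of the staged expansion of a single char
theorem pvFoldFlatMap (ds : List Char) : ∀ (xs : List Char),
    ds.foldl (fun s d => s.flatMap (pvR d)) xs =
      xs.flatMap (fun c => ds.foldl (fun s d => s.flatMap (pvR d)) [c]) := by
  induction ds with
  | nil => intro xs; simp
  | cons d ds ih =>
    intro xs
    simp only [List.foldl_cons]
    rw [ih (xs.flatMap (pvR d)), List.flatMap_assoc]
    congr 1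
    funext c
    simp only [List.flatMap_cons, List.flatMap_nil, List.append_nil]
    rw [ih (pvR d c)]

-- the eight staged passes expand one character exactly as pvE does
theorem pvChainChar (c : Char) :
    (['1', '2', '3', '4', '5', '6', '7', '8'] : List Char).foldl
      (fun s d => s.flatMap (pvR d)) [c] = pvE c := by
  by_cases h1 : c = '1'; · subst h1; decide
  by_cases h2 : c = '2'; · subst h2; decide
  by_cases h3 : c = '3'; · subst h3; decide
  by_cases h4 : c = '4'; · subst h4; decide
  by_cases h5 : c = '5'; · subst h5; decide
  by_cases h6 : c = '6'; · subst h6; decide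
  by_cases h7 : c = '7'; · subst h7; decide
  by_cases h8 : c = '8'; · subst h8; decide
  simp [List.foldl_cons, pvR, pvE, h1, h2, h3, h4, h5, h6, h7, h8]

-- B's replace loop equals the single flatMap pvE
theorem pvCleaned_alt (xs : List Char) :
    (['1', '2', '3', '4', '5', '6', '7', '8'] : List Char).foldl
      (fun s d => PySem.Chars.replace s [d]
        (List.replicate ((PySem.Int.ofChars? [d]).getD 0).toNat '-')) xs
      = xs.flatMap pvE := by
  have hstep : (fun (s : List Char) (d : Char) => PySem.Chars.replace s [d]
      (List.replicate ((PySem.Int.ofChars? [d]).getD 0).toNat '-'))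
      = fun s d => s.flatMap (pvR d) := by
    funext s d
    rw [pvReplace1]
    rfl
  rw [hstep, pvFoldFlatMap]
  congr 1
  funext c
  exact pvChainChar c

-- the inner 'for repeats in range(int(c))' loop appends that many dashes
theorem pvInner_foldl (l : List Int) (acc : List Char) :
    l.foldl (fun a _ => a ++ ['-']) acc = acc ++ List.replicate l.length '-' := by
  induction l generalizing acc with
  | nil => simp
  | cons x t ih => simp [ih, List.replicate_succ]

-- A's character loop builds exactly the flatMap of pvE
theorem pvClean_eq (xs : List Char) (acc : List Char) :
    xs.foldl (fun acc c =>
      if c ∈ (['1', '2', '3', '4', '5', '6', '7', '8'] : List Char) then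
        (PySem.List.pyRange 0 ((PySem.Int.ofChars? [c]).getD 0) 1).foldl
          (fun a _ => a ++ ['-']) acc
      else acc ++ [c]) acc = acc ++ xs.flatMap pvE := by
  induction xs generalizing acc with
  | nil => simp
  | cons c xs ih =>
    simp only [List.foldl_cons, List.flatMap_cons]
    by_cases hc : c ∈ (['1', '2', '3', '4', '5', '6', '7', '8'] : List Char)
    · rw [if_pos hc, pvInner_foldl, PySem.List.length_pyRange_one, ih]
      have hE : pvE c = List.replicate ((PySem.Int.ofChars? [c]).getD 0).toNat '-' := by
        unfold pvE; rw [if_pos hc]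
      have hv : (((PySem.Int.ofChars? [c]).getD 0 : Int) - 0).toNat
          = ((PySem.Int.ofChars? [c]).getD 0).toNat := by simp
      rw [hv, hE, List.append_assoc]
    · rw [if_neg hc, ih]
      have hE : pvE c = [c] := by unfold pvE; rw [if_neg hc]
      rw [hE, List.append_assoc]

theorem pvCopy_foldl (row : List String) (acc : List String) :
    row.foldl (fun ri ch => ri ++ [ch]) acc = acc ++ row := by
  induction row generalizing acc with
  | nil => simp
  | cons x t ih => simp [ih]

theorem pvGrid_foldl (rows : List (List String)) (acc : List (List String)) :
    rows.foldl (fun g row => g ++ [row.foldl (fun ri ch => ri ++ [ch]) []]) acc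
      = acc ++ rows := by
  induction rows generalizing acc with
  | nil => simp
  | cons r rs ih =>
    rw [List.foldl_cons, pvCopy_foldl, List.nil_append, ih]
    simp

-- ===== VERDICT (by name: the statement is the Claim_ definition above) =====
theorem expandFEN_py_spec : Claim_equal_expandFEN_py := by
  intro boardFEN _
  show expandFEN_py boardFEN = expandFEN_py_alt boardFEN
  unfold expandFEN_py expandFEN_py_alt
  simp only []
  rw [pvClean_eq, List.nil_append, pvGrid_foldl, List.nil_append, pvCleaned_alt]
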